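-- pv_equiv track=rewrite | github.com/wang301208/xianxuanai | BrainSimulationSystem/models/language_processing.py | _infer_dependency_arcs
-- ===== SOURCE A (Python) =====
-- from typing import Any, Dict, Iterable, List, Optional, Sequence, Tuple
--
-- def _infer_dependency_arcs(
--
--     tokens: Sequence[str],
--     pos_tags: Sequence[str],
-- ) -> Tuple[Optional[int], List[Tuple[int, int, str]]]:
--     """Infer a lightweight dependency structure for downstream semantic grounding.
--
--     Returns (root_index, arcs) where arcs are (head_index, dependent_index, relation).
--     The head_index is -1 for the sentence root.
--     """
--
--     if not tokens:
--         return None, []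
--
--     root_idx: Optional[int] = None
--     for i, pos in enumerate(pos_tags):
--         if pos in {"V", "Gerund"}:
--             root_idx = i
--             break
--     if root_idx is None:
--         for i, pos in enumerate(pos_tags):
--             if pos in {"N", "Pronoun"}:
--                 root_idx = i
--                 break
--     if root_idx is None:
--         root_idx = 0
--
--     arcs: List[Tuple[int, int, str]] = [(-1, int(root_idx), "root")]
--
--     def _next_content_word(start: int) -> Optional[int]:
--         for j in range(start, len(tokens)):
--             if pos_tags[j] in {"N", "Pronoun", "ProperNoun", "UNK"}:
--                 return j
--         return None
--
--     # Subject: select the closest content word before the root.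
--     subject_idx: Optional[int] = None
--     for j in range(int(root_idx) - 1, -1, -1):
--         if pos_tags[j] in {"N", "Pronoun", "ProperNoun", "UNK"}:
--             subject_idx = j
--             break
--     if subject_idx is not None and subject_idx != root_idx:
--         arcs.append((int(root_idx), int(subject_idx), "subject"))
--
--     # Object: select the first content word after the root.
--     object_idx = _next_content_word(int(root_idx) + 1)
--     if object_idx is not None and object_idx != root_idx:
--         arcs.append((int(root_idx), int(object_idx), "object"))
--
--     # Attach auxiliaries/modals near the root.
--     for i, pos in enumerate(pos_tags):
--         if i == root_idx:
--             continue
--         if pos in {"Aux", "Modal"} and abs(i - int(root_idx)) <= 2: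
--             arcs.append((int(root_idx), i, "aux"))
--
--     # Adverbs typically modify the verb phrase.
--     for i, pos in enumerate(pos_tags):
--         if i == root_idx:
--             continue
--         if pos == "Adv":
--             arcs.append((int(root_idx), i, "modifier"))
--
--     # Determiners/adjectives attach to the next noun-like token.
--     for i, pos in enumerate(pos_tags):
--         if pos not in {"Det", "Adj"}:
--             continue
--         noun_idx = _next_content_word(i + 1)
--         if noun_idx is None:
--             continue
--         relation = "attribute" if pos == "Det" else "modifier"
--         arcs.append((noun_idx, i, relation))
--
--     # Simple prepositional phrase handling: attach preposition to root and its object to the preposition.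
--     for i, pos in enumerate(pos_tags):
--         if pos != "P":
--             continue
--         if i != root_idx:
--             arcs.append((int(root_idx), i, "attribute"))
--         pobj = _next_content_word(i + 1)
--         if pobj is not None and pobj != i:
--             arcs.append((i, pobj, "object"))
--
--     # De-duplicate while preserving order.
--     deduped: List[Tuple[int, int, str]] = []
--     seen = set()
--     for arc in arcs:
--         if arc in seen:
--             continue
--         seen.add(arc)
--         deduped.append(arc)
--     return int(root_idx), deduped
-- ===== SOURCE B (Python) =====
-- def _infer_dependency_arcs(tokens, pos_tags):
--     if not tokens:
--         return None, []
--     n = len(tokens)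
--     content = ("N", "Pronoun", "ProperNoun", "UNK")
--
--     # right-to-left precomputed next-content-word table: nxt[j] = first content index >= j, else None
--     nxt = [None] * (n + 1)
--     for j in range(n - 1, -1, -1):
--         nxt[j] = j if pos_tags[j] in content else nxt[j + 1]
--
--     def ncw(start):
--         return nxt[min(start, n)]
--
--     enum = list(enumerate(pos_tags))
--     root = next((i for i, p in enum if p in ("V", "Gerund")),
--                 next((i for i, p in enum if p in ("N", "Pronoun")), 0))
--
--     cands = [j for j in range(root) if pos_tags[j] in content]
--     subject = cands[-1] if cands else None
--     obj = ncw(root + 1)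
--
--     core = [(-1, root, "root")]
--     core += [(root, subject, "subject")] if subject is not None and subject != root else []
--     core += [(root, obj, "object")] if obj is not None and obj != root else []
--
--     aux = [(root, i, "aux") for i, p in enum
--            if i != root and p in ("Aux", "Modal") and abs(i - root) <= 2]
--     mods = [(root, i, "modifier") for i, p in enum if i != root and p == "Adv"]
--     attrs = [(ncw(i + 1), i, "attribute" if p == "Det" else "modifier")
--              for i, p in enum if p in ("Det", "Adj") and ncw(i + 1) is not None]
--
--     def prep_arcs(i, p):
--         if p != "P":
--             return []
--         out = [(root, i, "attribute")] if i != root else []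
--         pobj = ncw(i + 1)
--         if pobj is not None and pobj != i:
--             out.append((i, pobj, "object"))
--         return out
--
--     preps = [arc for i, p in enum for arc in prep_arcs(i, p)]
--
--     return root, list(dict.fromkeys(core + aux + mods + attrs + preps))
-- ===== Notes on version B (the rewrite author's own statement) =====
-- stated objective: alternative
-- what changed: Replaced the per-call linear _next_content_word scans with a right-to-left precomputed next-content-word table giving O(1) lookups, root via nested next() over one enumeration, subject as the last element of a filtered index list, and the four tag categories as independent comprehensions concatenated before a dict.fromkeys dedup.
-- outside the precondition, e.g. on _infer_dependency_arcs(['a'], []): A returns (0, [(-1, 0, 'root')]), B raises IndexError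
import Mathlib
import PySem

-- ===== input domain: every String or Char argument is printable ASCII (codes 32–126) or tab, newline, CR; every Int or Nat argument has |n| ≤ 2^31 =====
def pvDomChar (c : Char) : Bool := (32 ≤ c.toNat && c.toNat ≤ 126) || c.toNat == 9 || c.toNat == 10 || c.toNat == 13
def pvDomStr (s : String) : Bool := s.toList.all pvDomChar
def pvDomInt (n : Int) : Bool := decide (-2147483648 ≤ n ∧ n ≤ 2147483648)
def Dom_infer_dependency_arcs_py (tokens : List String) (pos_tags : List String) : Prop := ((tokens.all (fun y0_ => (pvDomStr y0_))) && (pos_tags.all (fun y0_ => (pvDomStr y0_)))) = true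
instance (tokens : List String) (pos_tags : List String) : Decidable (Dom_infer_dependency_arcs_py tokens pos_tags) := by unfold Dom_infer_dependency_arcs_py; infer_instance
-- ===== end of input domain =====

-- B replaces A's per-call linear content-word scans by a precomputed next-content-word table
-- (right-to-left pass) with O(1) lookups, a nested-first-match root search, subject as the last
-- of a filtered index list, and independent per-category comprehensions (alternative algorithm).

-- ===== PORT A =====

-- the content-tag test {"N","Pronoun","ProperNoun","UNK"} (shared set literal of both Pythons)
def pvContent (p : String) : Bool := p == "N" || p == "Pronoun" || p == "ProperNoun" || p == "UNK"

-- 'for j in <index list>: if pos_tags[j] in CONTENT: return j; return None'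
def pvScanFirst (pos : List String) : List Int → Option Int
  | [] => none
  | j :: rest => if pvContent (PySem.List.pyGetD pos j "") then some j else pvScanFirst pos rest

-- 'for i, pos in enumerate(pos_tags): if <test>(pos): root_idx = i; break'
def pvFindTag (p : String → Bool) : List (Int × String) → Option Int
  | [] => none
  | (i, t) :: rest => if p t then some i else pvFindTag p rest

-- _next_content_word(start): scan range(start, len(tokens))
def pvNcwA (tokens pos : List String) (start : Int) : Option Int :=
  pvScanFirst pos (PySem.List.pyRange start (tokens.length : Int) 1)

-- the seen-set de-duplication loop of A
def pvDedupA (arcs : List (Int × Int × String)) : List (Int × Int × String) :=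
  (arcs.foldl (fun (st : PySem.Set (Int × Int × String) × List (Int × Int × String)) arc =>
      if PySem.Set.contains st.1 arc then st else (PySem.Set.add st.1 arc, st.2 ++ [arc]))
    (PySem.Set.empty, [])).2

def infer_dependency_arcs_py (tokens : List String) (pos_tags : List String) :
    Option Int × (List (Int × Int × String)) :=
  if tokens.isEmpty then (none, [])
  else
    let e := PySem.List.enumerate pos_tags 0
    let root1 := pvFindTag (fun p => p == "V" || p == "Gerund") e
    let root2 := match root1 with
      | some r => some r
      | none => pvFindTag (fun p => p == "N" || p == "Pronoun") e
    let root : Int := root2.getD 0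
    let arcs : List (Int × Int × String) := [(-1, root, "root")]
    -- subject: for j in range(root-1, -1, -1)
    let subj := pvScanFirst pos_tags (PySem.List.pyRange (root - 1) (-1) (-1))
    let arcs := match subj with
      | some s => if s != root then arcs ++ [(root, s, "subject")] else arcs
      | none => arcs
    let arcs := match pvNcwA tokens pos_tags (root + 1) with
      | some o => if o != root then arcs ++ [(root, o, "object")] else arcs
      | none => arcs
    -- aux/modal loop
    let arcs := e.foldl (fun acc ip =>
      if ip.1 == root then acc
      else if (ip.2 == "Aux" || ip.2 == "Modal") && decide ((ip.1 - root).natAbs ≤ 2) then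
        acc ++ [(root, ip.1, "aux")]
      else acc) arcs
    -- adverb loop
    let arcs := e.foldl (fun acc ip =>
      if ip.1 == root then acc
      else if ip.2 == "Adv" then acc ++ [(root, ip.1, "modifier")]
      else acc) arcs
    -- determiner/adjective loop
    let arcs := e.foldl (fun acc ip =>
      if !(ip.2 == "Det" || ip.2 == "Adj") then acc
      else match pvNcwA tokens pos_tags (ip.1 + 1) with
        | none => acc
        | some nn => acc ++ [(nn, ip.1, if ip.2 == "Det" then "attribute" else "modifier")]) arcs
    -- preposition loop
    let arcs := e.foldl (fun acc ip =>
      if ip.2 != "P" then acc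
      else
        let acc' := if ip.1 != root then acc ++ [(root, ip.1, "attribute")] else acc
        match pvNcwA tokens pos_tags (ip.1 + 1) with
        | some pobj => if pobj != ip.1 then acc' ++ [(ip.1, pobj, "object")] else acc'
        | none => acc') arcs
    (some root, pvDedupA arcs)

-- ===== PORT B =====

-- 'nxt = [None]*(n+1); for j in reversed(range(n)): nxt[j] = j if content else nxt[j+1]':
-- the table entries for indices j..n, built right to left
def pvNxtFrom (pos : List String) (j : Nat) : Nat → List (Option Int)
  | 0 => [none]
  | m + 1 =>
    let rest := pvNxtFrom pos (j + 1) m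
    (if pvContent (PySem.List.pyGetD pos (j : Int) "") then some (j : Int) else rest.headD none) :: rest

-- 'def ncw(start): return nxt[min(start, n)]'
def pvNxtGet (nxt : List (Option Int)) (n : Nat) (start : Int) : Option Int :=
  nxt.getD (min start (n : Int)).toNat none

-- 'def prep_arcs(i, p): …' of Source B
def pvPrepArcs (root : Int) (ncw : Int → Option Int) (ip : Int × String) :
    List (Int × Int × String) :=
  if ip.2 != "P" then []
  else
    let out := if ip.1 != root then [(root, ip.1, "attribute")] else []
    match ncw (ip.1 + 1) with
    | some pobj => if pobj != ip.1 then out ++ [(ip.1, pobj, "object")] else out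
    | none => out

def infer_dependency_arcs_py_alt (tokens : List String) (pos_tags : List String) :
    Option Int × (List (Int × Int × String)) :=
  if tokens.isEmpty then (none, [])
  else
    let n := tokens.length
    let nxt := pvNxtFrom pos_tags 0 n
    let ncw : Int → Option Int := fun start => pvNxtGet nxt n start
    let enum := PySem.List.enumerate pos_tags 0
    -- root = next((i for i,p in enum if p in ("V","Gerund")), next((… "N","Pronoun" …), 0))
    let root : Int :=
      ((enum.find? (fun ip => ip.2 == "V" || ip.2 == "Gerund")).map Prod.fst).getD
        (((enum.find? (fun ip => ip.2 == "N" || ip.2 == "Pronoun")).map Prod.fst).getD 0)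
    -- cands = [j for j in range(root) if pos_tags[j] in content]; subject = cands[-1] if cands else None
    let cands := (PySem.List.pyRange 0 root 1).filter
        (fun j => pvContent (PySem.List.pyGetD pos_tags j ""))
    let subject := cands.getLast?
    let obj := ncw (root + 1)
    let core := [((-1 : Int), root, "root")]
      ++ (match subject with
          | some s => if s != root then [(root, s, "subject")] else []
          | none => [])
      ++ (match obj with
          | some o => if o != root then [(root, o, "object")] else []
          | none => [])
    let aux := enum.filterMap (fun ip =>
      if ip.1 != root && (ip.2 == "Aux" || ip.2 == "Modal") && decide ((ip.1 - root).natAbs ≤ 2)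
      then some (root, ip.1, "aux") else none)
    let mods := enum.filterMap (fun ip =>
      if ip.1 != root && ip.2 == "Adv" then some (root, ip.1, "modifier") else none)
    let attrs := enum.filterMap (fun ip =>
      if ip.2 == "Det" || ip.2 == "Adj"
      then (ncw (ip.1 + 1)).map (fun nn => (nn, ip.1, if ip.2 == "Det" then "attribute" else "modifier"))
      else none)
    let preps := enum.flatMap (pvPrepArcs root ncw)
    (some root, PySem.List.dedup (core ++ aux ++ mods ++ attrs ++ preps))

-- ===== PRECONDITION & SPEC =====
-- Pre_ excludes inputs with fewer pos_tags than tokens: there A's content-word scan indexes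
-- pos_tags out of range and (except for degenerate cases where every scanned range is empty
-- or a content tag is hit first) raises IndexError, and B's table-building pass raises too.
def Pre_infer_dependency_arcs_py (tokens : List String) (pos_tags : List String) : Prop :=
  tokens = [] ∨ tokens.length ≤ pos_tags.length
instance (tokens : List String) (pos_tags : List String) : Decidable (Pre_infer_dependency_arcs_py tokens pos_tags) := by unfold Pre_infer_dependency_arcs_py; infer_instance

def pvWitness_infer_dependency_arcs_py : List String × List String :=
  (["the", "cat", "sleeps"], ["Det", "N", "V"])

def Spec_infer_dependency_arcs_py (tokens : List String) (pos_tags : List String) (out : Option Int × (List (Int × Int × String))) : Prop := out = infer_dependency_arcs_py_alt tokens pos_tags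
instance (tokens : List String) (pos_tags : List String) (out : Option Int × (List (Int × Int × String))) : Decidable (Spec_infer_dependency_arcs_py tokens pos_tags out) := by unfold Spec_infer_dependency_arcs_py; infer_instance

-- ===== CLAIM (what is proved, stated in full; the proofs are below) =====
def Claim_equal_infer_dependency_arcs_py : Prop := ∀ (tokens : List String) (pos_tags : List String), Dom_infer_dependency_arcs_py tokens pos_tags → Pre_infer_dependency_arcs_py tokens pos_tags → Spec_infer_dependency_arcs_py tokens pos_tags (infer_dependency_arcs_py tokens pos_tags)

-- ===== LEMMAS AND PROOFS =====

-- per-token arc contributions of A's four tag loops, in per-iteration form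
def pvGAux (root : Int) (ip : Int × String) : List (Int × Int × String) :=
  if ip.1 == root then []
  else if (ip.2 == "Aux" || ip.2 == "Modal") && decide ((ip.1 - root).natAbs ≤ 2) then [(root, ip.1, "aux")]
  else []

def pvGMod (root : Int) (ip : Int × String) : List (Int × Int × String) :=
  if ip.1 == root then [] else if ip.2 == "Adv" then [(root, ip.1, "modifier")] else []

def pvGAttr (tokens pos : List String) (ip : Int × String) : List (Int × Int × String) :=
  if !(ip.2 == "Det" || ip.2 == "Adj") then []
  else match pvNcwA tokens pos (ip.1 + 1) with
    | none => []
    | some nn => [(nn, ip.1, if ip.2 == "Det" then "attribute" else "modifier")]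

def pvGPrep (tokens pos : List String) (root : Int) (ip : Int × String) : List (Int × Int × String) :=
  if ip.2 != "P" then []
  else (if ip.1 != root then [(root, ip.1, "attribute")] else []) ++
    (match pvNcwA tokens pos (ip.1 + 1) with
     | some pobj => if pobj != ip.1 then [(ip.1, pobj, "object")] else []
     | none => [])

-- the common normal form of both ports
def pvRootA (pos : List String) : Int :=
  (match pvFindTag (fun p => p == "V" || p == "Gerund") (PySem.List.enumerate pos 0) with
   | some r => some r
   | none => pvFindTag (fun p => p == "N" || p == "Pronoun") (PySem.List.enumerate pos 0)).getD 0

def pvCanon (tokens pos : List String) : Option Int × (List (Int × Int × String)) :=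
  if tokens.isEmpty then (none, [])
  else
    let e := PySem.List.enumerate pos 0
    let root : Int := pvRootA pos
    let arcs : List (Int × Int × String) := [(-1, root, "root")]
    let arcs := match pvScanFirst pos (PySem.List.pyRange (root - 1) (-1) (-1)) with
      | some s => if s != root then arcs ++ [(root, s, "subject")] else arcs
      | none => arcs
    let arcs := match pvNcwA tokens pos (root + 1) with
      | some o => if o != root then arcs ++ [(root, o, "object")] else arcs
      | none => arcs
    (some root, PySem.List.dedup (arcs ++ e.flatMap (pvGAux root) ++ e.flatMap (pvGMod root)
      ++ e.flatMap (pvGAttr tokens pos) ++ e.flatMap (pvGPrep tokens pos root)))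

-- ---- A-side lemmas: each append loop is a flatMap, the seen-set loop is dedup ----

theorem pvAuxLoop_eq (root : Int) (e : List (Int × String)) (acc : List (Int × Int × String)) :
    e.foldl (fun acc ip =>
      if ip.1 == root then acc
      else if (ip.2 == "Aux" || ip.2 == "Modal") && decide ((ip.1 - root).natAbs ≤ 2) then
        acc ++ [(root, ip.1, "aux")]
      else acc) acc = acc ++ e.flatMap (pvGAux root) := by
  have h : (fun (acc : List (Int × Int × String)) (ip : Int × String) =>
      if ip.1 == root then acc
      else if (ip.2 == "Aux" || ip.2 == "Modal") && decide ((ip.1 - root).natAbs ≤ 2) then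
        acc ++ [(root, ip.1, "aux")]
      else acc) = fun acc ip => acc ++ pvGAux root ip := by
    funext acc ip; simp only [pvGAux]; split_ifs <;> simp
  rw [h, PySem.List.foldl_append_eq_flatMap]

theorem pvModLoop_eq (root : Int) (e : List (Int × String)) (acc : List (Int × Int × String)) :
    e.foldl (fun acc ip =>
      if ip.1 == root then acc
      else if ip.2 == "Adv" then acc ++ [(root, ip.1, "modifier")]
      else acc) acc = acc ++ e.flatMap (pvGMod root) := by
  have h : (fun (acc : List (Int × Int × String)) (ip : Int × String) =>
      if ip.1 == root then acc
      else if ip.2 == "Adv" then acc ++ [(root, ip.1, "modifier")]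
      else acc) = fun acc ip => acc ++ pvGMod root ip := by
    funext acc ip; simp only [pvGMod]; split_ifs <;> simp
  rw [h, PySem.List.foldl_append_eq_flatMap]

theorem pvAttrLoop_eq (tokens pos : List String) (e : List (Int × String)) (acc : List (Int × Int × String)) :
    e.foldl (fun acc ip =>
      if !(ip.2 == "Det" || ip.2 == "Adj") then acc
      else match pvNcwA tokens pos (ip.1 + 1) with
        | none => acc
        | some nn => acc ++ [(nn, ip.1, if ip.2 == "Det" then "attribute" else "modifier")]) acc
    = acc ++ e.flatMap (pvGAttr tokens pos) := by
  have h : (fun (acc : List (Int × Int × String)) (ip : Int × String) =>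
      if !(ip.2 == "Det" || ip.2 == "Adj") then acc
      else match pvNcwA tokens pos (ip.1 + 1) with
        | none => acc
        | some nn => acc ++ [(nn, ip.1, if ip.2 == "Det" then "attribute" else "modifier")])
      = fun acc ip => acc ++ pvGAttr tokens pos ip := by
    funext acc ip; simp only [pvGAttr]
    split_ifs with h1 <;> cases pvNcwA tokens pos (ip.1 + 1) <;> simp
  rw [h, PySem.List.foldl_append_eq_flatMap]

theorem pvPrepLoop_eq (tokens pos : List String) (root : Int) (e : List (Int × String)) (acc : List (Int × Int × String)) :
    e.foldl (fun acc ip =>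
      if ip.2 != "P" then acc
      else
        let acc' := if ip.1 != root then acc ++ [(root, ip.1, "attribute")] else acc
        match pvNcwA tokens pos (ip.1 + 1) with
        | some pobj => if pobj != ip.1 then acc' ++ [(ip.1, pobj, "object")] else acc'
        | none => acc') acc
    = acc ++ e.flatMap (pvGPrep tokens pos root) := by
  have h : (fun (acc : List (Int × Int × String)) (ip : Int × String) =>
      if ip.2 != "P" then acc
      else
        let acc' := if ip.1 != root then acc ++ [(root, ip.1, "attribute")] else acc
        match pvNcwA tokens pos (ip.1 + 1) with
        | some pobj => if pobj != ip.1 then acc' ++ [(ip.1, pobj, "object")] else acc'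
        | none => acc') = fun acc ip => acc ++ pvGPrep tokens pos root ip := by
    funext acc ip
    by_cases h1 : (ip.2 != "P") = true
    · simp [pvGPrep, h1]
    · by_cases h2 : (ip.1 != root) = true <;>
        cases hn : pvNcwA tokens pos (ip.1 + 1) with
        | none => simp [pvGPrep, h1, h2, hn]
        | some v =>
          by_cases h3 : (v != ip.1) = true <;> simp [pvGPrep, h1, h2, hn, h3]
  rw [h, PySem.List.foldl_append_eq_flatMap]

theorem pvDedupFold {T : Type} [BEq T] [LawfulBEq T] :
    ∀ (l : List T) (s : PySem.Set T),
      l.foldl (fun (st : PySem.Set T × List T) arc =>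
          if PySem.Set.contains st.1 arc then st else (PySem.Set.add st.1 arc, st.2 ++ [arc]))
        (s, (s : List T))
      = (l.foldl PySem.Set.add s, l.foldl PySem.Set.add s) := by
  intro l
  induction l with
  | nil => intro s; rfl
  | cons x rest ih =>
    intro s
    simp only [List.foldl_cons]
    by_cases h : PySem.Set.contains s x
    · have hmem : x ∈ s := by rw [← PySem.Set.contains_iff]; exact h
      have hadd : PySem.Set.add s x = s := PySem.Set.add_of_mem hmem
      simp only [h, if_pos, hadd]
      exact ih s
    · have hmem : x ∉ s := by rw [← PySem.Set.contains_iff]; simpa using h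
      have hadd : PySem.Set.add s x = s ++ [x] := PySem.Set.add_of_not_mem hmem
      simp only [h, if_neg, Bool.false_eq_true, not_false_iff, hadd]
      have := ih (PySem.Set.add s x)
      rw [hadd] at this
      exact this

theorem pvDedupA_eq (l : List (Int × Int × String)) : pvDedupA l = PySem.List.dedup l := by
  unfold pvDedupA
  rw [show ((PySem.Set.empty : PySem.Set (Int × Int × String)), ([] : List (Int × Int × String)))
      = ((PySem.Set.empty : PySem.Set (Int × Int × String)), ((PySem.Set.empty : PySem.Set (Int × Int × String)) : List (Int × Int × String))) from rfl]
  rw [pvDedupFold l PySem.Set.empty]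
  rw [PySem.List.dedup_eq_ofList, PySem.Set.ofList_eq_foldl]
  rfl

theorem pvA_eq_canon (tokens pos : List String) :
    infer_dependency_arcs_py tokens pos = pvCanon tokens pos := by
  unfold infer_dependency_arcs_py pvCanon
  by_cases h : tokens.isEmpty
  · simp only [h, if_pos]
  · simp only [h, Bool.false_eq_true, if_neg, not_false_iff]
    rw [pvAuxLoop_eq, pvModLoop_eq, pvAttrLoop_eq, pvPrepLoop_eq, pvDedupA_eq]
    rfl

-- ---- B-side lemmas ----

-- the table entries are the linear scans
theorem pvNxtFrom_getD (pos : List String) :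
    ∀ (m j k : Nat), k ≤ m →
      (pvNxtFrom pos j m).getD k none
        = pvScanFirst pos (PySem.List.pyRange ((j + k : Nat) : Int) ((j + m : Nat) : Int) 1) := by
  intro m
  induction m with
  | zero =>
    intro j k hk
    interval_cases k
    simp [pvNxtFrom, PySem.List.pyRange_one_eq_nil, pvScanFirst]
  | succ m ih =>
    intro j k hk
    cases k with
    | zero =>
      have hcons : PySem.List.pyRange ((j + 0 : Nat) : Int) ((j + (m+1) : Nat) : Int) 1
          = ((j : Int)) :: PySem.List.pyRange ((j : Int) + 1) ((j + (m+1) : Nat) : Int) 1 := by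
        rw [PySem.List.pyRange_one_cons (by push_cast; omega)]
        norm_num
      rw [hcons]
      simp only [pvNxtFrom, pvScanFirst, List.getD_cons_zero]
      have h0 := ih (j + 1) 0 (Nat.zero_le m)
      have harg : ((j + 1 + 0 : Nat) : Int) = (j : Int) + 1 := by push_cast; ring
      have harg2 : ((j + 1 + m : Nat) : Int) = ((j + (m + 1) : Nat) : Int) := by push_cast; ring
      rw [harg, harg2] at h0
      have hhd : (pvNxtFrom pos (j + 1) m).headD none = (pvNxtFrom pos (j + 1) m).getD 0 none := by
        cases pvNxtFrom pos (j + 1) m <;> rfl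
      rw [hhd, h0]
    | succ k =>
      simp only [pvNxtFrom, List.getD_cons_succ]
      rw [ih (j + 1) k (by omega)]
      have harg : ((j + 1 + k : Nat) : Int) = ((j + (k + 1) : Nat) : Int) := by push_cast; ring
      have harg2 : ((j + 1 + m : Nat) : Int) = ((j + (m + 1) : Nat) : Int) := by push_cast; ring
      rw [harg, harg2]

-- the O(1) table lookup equals A's linear scan
theorem pvNxtGet_eq (tokens pos : List String) (start : Int) (h0 : 0 ≤ start) :
    pvNxtGet (pvNxtFrom pos 0 tokens.length) tokens.length start = pvNcwA tokens pos start := by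
  unfold pvNxtGet pvNcwA
  by_cases hs : start ≤ (tokens.length : Int)
  · have hmin : (min start (tokens.length : Int)).toNat = start.toNat := by omega
    rw [hmin]
    have h := pvNxtFrom_getD pos tokens.length 0 start.toNat (by omega)
    simp only [Nat.zero_add] at h
    rw [h, Int.toNat_of_nonneg h0]
  · have hmin : (min start (tokens.length : Int)).toNat = tokens.length := by omega
    rw [hmin]
    have h := pvNxtFrom_getD pos tokens.length 0 tokens.length le_rfl
    simp only [Nat.zero_add] at h
    rw [h, PySem.List.pyRange_one_eq_nil le_rfl, PySem.List.pyRange_one_eq_nil (by omega)]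

-- B's find?-based first-match search is A's break loop
theorem pvFind?_eq_pvFindTag (p : String → Bool) (q : Int × String → Bool)
    (hq : ∀ ip, q ip = p ip.2) :
    ∀ (e : List (Int × String)),
      (e.find? q).map Prod.fst = pvFindTag p e := by
  intro e
  induction e with
  | nil => rfl
  | cons ip rest ih =>
    obtain ⟨i, t⟩ := ip
    simp only [List.find?_cons, pvFindTag, hq (i, t)]
    by_cases hp : p t = true
    · simp [hp]
    · simp only [hp, Bool.false_eq_true, if_neg, not_false_iff]
      simpa [hp] using ih

-- B's nested-default root equals A's two-pass root
theorem pvRootB_eq (pos : List String) :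
    (((PySem.List.enumerate pos 0).find? (fun ip => ip.2 == "V" || ip.2 == "Gerund")).map Prod.fst).getD
      ((((PySem.List.enumerate pos 0).find? (fun ip => ip.2 == "N" || ip.2 == "Pronoun")).map Prod.fst).getD 0)
    = pvRootA pos := by
  unfold pvRootA
  rw [pvFind?_eq_pvFindTag (fun s => s == "V" || s == "Gerund") _ (fun _ => rfl),
    pvFind?_eq_pvFindTag (fun s => s == "N" || s == "Pronoun") _ (fun _ => rfl)]
  cases pvFindTag (fun p => p == "V" || p == "Gerund") (PySem.List.enumerate pos 0) <;>
    cases pvFindTag (fun p => p == "N" || p == "Pronoun") (PySem.List.enumerate pos 0) <;> rfl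

-- A's first-hit scan is head? of the filtered list
theorem pvScanFirst_eq_head?_filter (pos : List String) :
    ∀ (l : List Int),
      pvScanFirst pos l = (l.filter (fun j => pvContent (PySem.List.pyGetD pos j ""))).head? := by
  intro l
  induction l with
  | nil => rfl
  | cons x t ih =>
    simp only [pvScanFirst, List.filter_cons]
    by_cases hc : pvContent (PySem.List.pyGetD pos x "") = true
    · simp [hc]
    · simp only [hc, Bool.false_eq_true, if_neg, not_false_iff]
      exact ih

-- B's 'cands[-1]' equals A's backward scan
theorem pvSubjB_eq (pos : List String) (root : Int) :
    ((PySem.List.pyRange 0 root 1).filter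
        (fun j => pvContent (PySem.List.pyGetD pos j ""))).getLast?
      = pvScanFirst pos (PySem.List.pyRange (root - 1) (-1) (-1)) := by
  have hrev : PySem.List.pyRange (root - 1) (-1) (-1)
      = (PySem.List.pyRange 0 root 1).reverse := by
    rw [PySem.List.pyRange_neg_one_eq_reverse]
    norm_num
  rw [hrev, pvScanFirst_eq_head?_filter, List.filter_reverse, List.head?_reverse]

-- filterMap written as the flatMap of the singleton lists
theorem pvFilterMap_eq_flatMap {α β : Type} (f : α → Option β) (g : α → List β)
    (h : ∀ a, (f a).toList = g a) : ∀ l : List α, l.filterMap f = l.flatMap g := by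
  intro l
  induction l with
  | nil => rfl
  | cons x t ih =>
    rw [List.filterMap_cons, List.flatMap_cons, ← h x, ← ih]
    cases f x <;> rfl

theorem pvAuxB_eq (root : Int) (e : List (Int × String)) :
    e.filterMap (fun ip =>
      if ip.1 != root && (ip.2 == "Aux" || ip.2 == "Modal") && decide ((ip.1 - root).natAbs ≤ 2)
      then some (root, ip.1, "aux") else none) = e.flatMap (pvGAux root) := by
  apply pvFilterMap_eq_flatMap
  intro ip
  simp only [pvGAux]
  by_cases h1 : (ip.1 == root) = true
  · simp [h1, bne]
  · by_cases h2 : ((ip.2 == "Aux" || ip.2 == "Modal") && decide ((ip.1 - root).natAbs ≤ 2)) = true <;>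
      simp [h1, h2, bne]

theorem pvModB_eq (root : Int) (e : List (Int × String)) :
    e.filterMap (fun ip =>
      if ip.1 != root && ip.2 == "Adv" then some (root, ip.1, "modifier") else none)
    = e.flatMap (pvGMod root) := by
  apply pvFilterMap_eq_flatMap
  intro ip
  simp only [pvGMod]
  by_cases h1 : (ip.1 == root) = true
  · simp [h1, bne]
  · by_cases h2 : (ip.2 == "Adv") = true <;> simp [h1, h2, bne]

-- indices produced by enumerate are nonnegative, hence the table lookups agree with the scans
theorem pvAttrB_eq (tokens pos : List String) :
    (PySem.List.enumerate pos 0).filterMap (fun ip =>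
      if ip.2 == "Det" || ip.2 == "Adj"
      then (pvNxtGet (pvNxtFrom pos 0 tokens.length) tokens.length (ip.1 + 1)).map
            (fun nn => (nn, ip.1, if ip.2 == "Det" then "attribute" else "modifier"))
      else none)
    = (PySem.List.enumerate pos 0).flatMap (pvGAttr tokens pos) := by
  rw [pvFilterMap_eq_flatMap _
      (fun ip => if ip.2 == "Det" || ip.2 == "Adj"
        then ((pvNxtGet (pvNxtFrom pos 0 tokens.length) tokens.length (ip.1 + 1)).map
          (fun nn => (nn, ip.1, if ip.2 == "Det" then "attribute" else "modifier"))).toList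
        else [])
      (by intro ip; by_cases hd : (ip.2 == "Det" || ip.2 == "Adj") = true <;> simp [hd])]
  apply List.flatMap_congr
  intro ip hip
  rcases (PySem.List.mem_enumerate_iff _ _ _).mp hip with ⟨k, hk, rfl⟩
  simp only [pvGAttr]
  rw [pvNxtGet_eq tokens pos ((0 : Int) + k + 1) (by omega)]
  by_cases hd : (pos[k] == "Det" || pos[k] == "Adj") = true
  · cases hnc : pvNcwA tokens pos ((0 : Int) + k + 1) <;> simp [hd]
  · simp [hd]

theorem pvPrepB_eq (tokens pos : List String) (root : Int) :
    (PySem.List.enumerate pos 0).flatMap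
        (pvPrepArcs root (fun start => pvNxtGet (pvNxtFrom pos 0 tokens.length) tokens.length start))
    = (PySem.List.enumerate pos 0).flatMap (pvGPrep tokens pos root) := by
  apply List.flatMap_congr
  intro ip hip
  rcases (PySem.List.mem_enumerate_iff _ _ _).mp hip with ⟨k, hk, rfl⟩
  simp only [pvPrepArcs, pvGPrep]
  rw [pvNxtGet_eq tokens pos ((0 : Int) + k + 1) (by omega)]
  by_cases hp : ((pos[k] : String) != "P") = true
  · simp [hp]
  · cases hn : pvNcwA tokens pos ((0 : Int) + k + 1) <;> simp [hp] <;> (try split_ifs) <;> simp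

theorem pvFindTag_mem :
    ∀ (e : List (Int × String)) (p : String → Bool) (r : Int),
      pvFindTag p e = some r → ∃ t, (r, t) ∈ e := by
  intro e p r
  induction e with
  | nil => intro h; simp [pvFindTag] at h
  | cons ip rest ih =>
    obtain ⟨i, t⟩ := ip
    intro h
    simp only [pvFindTag] at h
    by_cases hp : p t = true
    · rw [if_pos hp] at h
      cases h
      exact ⟨t, List.mem_cons_self ..⟩
    · rw [if_neg hp] at h
      rcases ih h with ⟨t', ht⟩
      exact ⟨t', List.mem_cons_of_mem _ ht⟩

theorem pvFindTag_enum_nonneg {pos : List String} {p : String → Bool} {r : Int}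
    (h : pvFindTag p (PySem.List.enumerate pos 0) = some r) : 0 ≤ r := by
  rcases pvFindTag_mem _ _ _ h with ⟨t, ht⟩
  rcases (PySem.List.mem_enumerate_iff _ _ _).mp ht with ⟨k, hk, heq⟩
  have : r = 0 + (k : Int) := congrArg Prod.fst heq
  omega

theorem pvRootA_nonneg (pos : List String) : 0 ≤ pvRootA pos := by
  unfold pvRootA
  cases hv : pvFindTag (fun p => p == "V" || p == "Gerund") (PySem.List.enumerate pos 0) with
  | some r => simpa using pvFindTag_enum_nonneg hv
  | none =>
    cases hn : pvFindTag (fun p => p == "N" || p == "Pronoun") (PySem.List.enumerate pos 0) with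
    | some r => simpa using pvFindTag_enum_nonneg hn
    | none => simp

theorem pvB_eq_canon (tokens pos : List String) :
    infer_dependency_arcs_py_alt tokens pos = pvCanon tokens pos := by
  unfold infer_dependency_arcs_py_alt pvCanon
  by_cases h : tokens.isEmpty
  · simp only [h, if_pos]
  · simp only [h, Bool.false_eq_true, if_neg, not_false_iff]
    rw [pvRootB_eq]
    rw [pvSubjB_eq]
    rw [pvNxtGet_eq tokens pos (pvRootA pos + 1) (by have := pvRootA_nonneg pos; omega)]
    rw [pvAuxB_eq, pvModB_eq, pvAttrB_eq, pvPrepB_eq]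
    cases pvScanFirst pos (PySem.List.pyRange (pvRootA pos - 1) (-1) (-1)) <;>
      cases pvNcwA tokens pos (pvRootA pos + 1) <;>
      simp only [List.append_assoc, List.append_nil] <;>
      split_ifs <;> simp

-- ===== VERDICT (by name: the statement is the Claim_ definition above) =====
theorem infer_dependency_arcs_py_spec : Claim_equal_infer_dependency_arcs_py := by
  intro tokens pos_tags _hdom _hpre
  unfold Spec_infer_dependency_arcs_py
  rw [pvA_eq_canon, pvB_eq_canon]
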